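-- pv_equiv track=rewrite | github.com/cyanmishra92/enhanced-rag-csd | scripts/emulation_performance_analysis.py | categorize_backends
-- ===== SOURCE A (Python) =====
-- def categorize_backends(results):
--     """Categorize backends into production vs emulation."""
--     production_backends = {}
--     emulation_backends = {}
--
--     for backend_name, backend_data in results.items():
--         if backend_name in ['enhanced_simulator', 'mock_spdk']:
--             production_backends[backend_name] = backend_data
--         elif backend_name in ['opencsd_emulator', 'spdk_vfio_user']:
--             emulation_backends[backend_name] = backend_data
--
--     return production_backends, emulation_backends
-- ===== SOURCE B (Python) =====
-- PRODUCTION_KEYS = ('enhanced_simulator', 'mock_spdk')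
-- EMULATION_KEYS = ('opencsd_emulator', 'spdk_vfio_user')
--
--
-- def categorize_backends(results):
--     """Categorize backends into production vs emulation (driven by the fixed key lists)."""
--     production_backends = {k: results[k] for k in PRODUCTION_KEYS if k in results}
--     emulation_backends = {k: results[k] for k in EMULATION_KEYS if k in results}
--     return production_backends, emulation_backends
-- ===== Notes on version B (the rewrite author's own statement) =====
-- stated objective: idiomatic
-- what changed: Instead of scanning all of results and testing each backend name against the two whitelists, B iterates over the fixed candidate key lists and looks each key up in results; the excluded inputs are those where this changes only the dicts' insertion order (Python-== equal either way).
import Mathlib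
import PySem

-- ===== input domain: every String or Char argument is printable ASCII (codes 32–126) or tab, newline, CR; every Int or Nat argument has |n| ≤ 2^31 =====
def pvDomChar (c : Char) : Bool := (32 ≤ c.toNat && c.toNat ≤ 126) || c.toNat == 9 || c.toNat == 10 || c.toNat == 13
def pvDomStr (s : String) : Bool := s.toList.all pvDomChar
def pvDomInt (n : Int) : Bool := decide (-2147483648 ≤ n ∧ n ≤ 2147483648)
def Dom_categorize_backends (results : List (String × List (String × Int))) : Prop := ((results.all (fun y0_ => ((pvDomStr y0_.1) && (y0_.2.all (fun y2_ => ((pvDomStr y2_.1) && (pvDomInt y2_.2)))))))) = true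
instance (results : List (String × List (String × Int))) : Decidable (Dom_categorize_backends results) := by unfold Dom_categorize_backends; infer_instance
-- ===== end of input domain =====

-- B drives the split from the fixed candidate key lists (lookups into results) instead of
-- scanning results against two whitelists; idiomatic restructuring, return value unchanged
-- up to dict insertion order (see Pre_).

-- ===== PORT A =====
-- the loop body of A ('if name in [...] : prod[name] = data elif name in [...] : emu[name] = data')
def catStep (st : PySem.Dict String (List (String × Int)) × PySem.Dict String (List (String × Int)))
    (p : String × List (String × Int)) :
    PySem.Dict String (List (String × Int)) × PySem.Dict String (List (String × Int)) :=
  if (["enhanced_simulator", "mock_spdk"] : List String).contains p.1 then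
    (st.1.insert p.1 p.2, st.2)
  else if (["opencsd_emulator", "spdk_vfio_user"] : List String).contains p.1 then
    (st.1, st.2.insert p.1 p.2)
  else st

def categorize_backends (results : List (String × List (String × Int))) : (List (String × List (String × Int))) × (List (String × List (String × Int))) :=
  let st := results.foldl catStep (PySem.Dict.empty, PySem.Dict.empty)
  (st.1.items, st.2.items)

-- ===== PORT B =====
def categorize_backends_alt (results : List (String × List (String × Int))) : (List (String × List (String × Int))) × (List (String × List (String × Int))) :=
  let d : PySem.Dict String (List (String × Int)) := PySem.Dict.mk results
  ((["enhanced_simulator", "mock_spdk"] : List String).filterMap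
      (fun k => (d.get? k).map (fun v => (k, v))),
   (["opencsd_emulator", "spdk_vfio_user"] : List String).filterMap
      (fun k => (d.get? k).map (fun v => (k, v))))

-- ===== PRECONDITION & SPEC =====
-- Pre_ excludes key lists with duplicate keys (impossible for a Python dict) and inputs where
-- the two production keys or the two emulation keys both occur but in the opposite of their
-- canonical order: there A's dicts (built in results order) and B's (built in fixed-key order)
-- are Python-== equal and differ only in accidental insertion order.
def Pre_categorize_backends (results : List (String × List (String × Int))) : Prop :=
  (results.map Prod.fst).Nodup ∧
  (results.map Prod.fst).filter (fun k => (["enhanced_simulator", "mock_spdk"] : List String).contains k)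
    = (["enhanced_simulator", "mock_spdk"] : List String).filter (fun k => (results.map Prod.fst).contains k) ∧
  (results.map Prod.fst).filter (fun k => (["opencsd_emulator", "spdk_vfio_user"] : List String).contains k)
    = (["opencsd_emulator", "spdk_vfio_user"] : List String).filter (fun k => (results.map Prod.fst).contains k)
instance (results : List (String × List (String × Int))) : Decidable (Pre_categorize_backends results) := by unfold Pre_categorize_backends; infer_instance

def pvWitness_categorize_backends : (List (String × List (String × Int))) :=
  [("enhanced_simulator", [("latency", 3)]), ("other_backend", []), ("opencsd_emulator", [("latency", 9)])]

def Spec_categorize_backends (results : List (String × List (String × Int))) (out : (List (String × List (String × Int))) × (List (String × List (String × Int)))) : Prop := out = categorize_backends_alt results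
instance (results : List (String × List (String × Int))) (out : (List (String × List (String × Int))) × (List (String × List (String × Int)))) : Decidable (Spec_categorize_backends results out) := by unfold Spec_categorize_backends; infer_instance

-- ===== CLAIM (what is proved, stated in full; the proofs are below) =====
def Claim_equal_categorize_backends : Prop := ∀ (results : List (String × List (String × Int))), Dom_categorize_backends results → Pre_categorize_backends results → Spec_categorize_backends results (categorize_backends results)

-- ===== LEMMAS AND PROOFS =====

theorem items_empty' : (PySem.Dict.empty : PySem.Dict String (List (String × Int))).items = [] := rfl

-- A's loop over fresh, distinct keys: the two dicts append exactly the matching entries.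
theorem foldA_items (l : List (String × List (String × Int)))
    (dp de : PySem.Dict String (List (String × Int)))
    (hp : ∀ p ∈ l, dp.contains p.1 = false)
    (he : ∀ p ∈ l, de.contains p.1 = false)
    (hnd : (l.map Prod.fst).Nodup) :
    (l.foldl catStep (dp, de)).1.items
      = dp.items ++ l.filter (fun p => (["enhanced_simulator", "mock_spdk"] : List String).contains p.1)
    ∧ (l.foldl catStep (dp, de)).2.items
      = de.items ++ l.filter (fun p => (["opencsd_emulator", "spdk_vfio_user"] : List String).contains p.1) := by
  induction l generalizing dp de with
  | nil => simp
  | cons p l ih =>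
    obtain ⟨k, v⟩ := p
    simp only [List.map_cons, List.nodup_cons] at hnd
    obtain ⟨hpnot, hnd⟩ := hnd
    have hfresh : ∀ q ∈ l, q.1 ≠ k := by
      intro q hq hEq
      exact hpnot (hEq ▸ List.mem_map_of_mem hq)
    have hdp := hp (k, v) (List.mem_cons_self ..)
    have hde := he (k, v) (List.mem_cons_self ..)
    by_cases h1 : (["enhanced_simulator", "mock_spdk"] : List String).contains k = true
    · have step : catStep (dp, de) (k, v) = (dp.insert k v, de) := by
        simp only [catStep]; rw [if_pos h1]
      have hp' : ∀ q ∈ l, (dp.insert k v).contains q.1 = false := by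
        intro q hq
        rw [PySem.Dict.contains_insert]
        simp [hfresh q hq, hp q (List.mem_cons_of_mem _ hq)]
      obtain ⟨ih1, ih2⟩ := ih (dp.insert k v) de hp'
        (fun q hq => he q (List.mem_cons_of_mem _ hq)) hnd
      have h1' : k = "enhanced_simulator" ∨ k = "mock_spdk" := by simpa using h1
      constructor
      · rw [List.foldl_cons, step, ih1, PySem.Dict.items_insert_of_not_contains dp v hdp]
        rcases h1' with h | h <;> subst h <;> simp
      · rw [List.foldl_cons, step, ih2]
        rcases h1' with h | h <;> subst h <;> simp
    · by_cases h2 : (["opencsd_emulator", "spdk_vfio_user"] : List String).contains k = true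
      · have step : catStep (dp, de) (k, v) = (dp, de.insert k v) := by
          simp only [catStep]; rw [if_neg h1, if_pos h2]
        have he' : ∀ q ∈ l, (de.insert k v).contains q.1 = false := by
          intro q hq
          rw [PySem.Dict.contains_insert]
          simp [hfresh q hq, he q (List.mem_cons_of_mem _ hq)]
        obtain ⟨ih1, ih2⟩ := ih dp (de.insert k v)
          (fun q hq => hp q (List.mem_cons_of_mem _ hq)) he' hnd
        have h2' : k = "opencsd_emulator" ∨ k = "spdk_vfio_user" := by simpa using h2
        constructor
        · rw [List.foldl_cons, step, ih1]
          rcases h2' with h | h <;> subst h <;> simp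
        · rw [List.foldl_cons, step, ih2, PySem.Dict.items_insert_of_not_contains de v hde]
          rcases h2' with h | h <;> subst h <;> simp
      · have step : catStep (dp, de) (k, v) = (dp, de) := by
          simp only [catStep]; rw [if_neg h1, if_neg h2]
        obtain ⟨ih1, ih2⟩ := ih dp de
          (fun q hq => hp q (List.mem_cons_of_mem _ hq))
          (fun q hq => he q (List.mem_cons_of_mem _ hq)) hnd
        have h1' : ¬ (k = "enhanced_simulator" ∨ k = "mock_spdk") := by simpa using h1
        have h2' : ¬ (k = "opencsd_emulator" ∨ k = "spdk_vfio_user") := by simpa using h2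
        constructor
        · rw [List.foldl_cons, step, ih1]; simp [h1']
        · rw [List.foldl_cons, step, ih2]; simp [h2']

-- a key occurring once in a dict's items: looking it up yields its unique entry
theorem get?_of_fst_mem {V : Type} (results : List (String × V)) {p : String × V}
    (hmem : p ∈ results) (hnd : (results.map Prod.fst).Nodup) :
    (PySem.Dict.mk results).get? p.1 = some p.2 :=
  PySem.Dict.get?_of_mem_items (d := PySem.Dict.mk results) hmem hnd

-- a sublist of the items whose key trace is [k] is the optional lookup of k
theorem eq_of_map_fst_single {V : Type} (results : List (String × V))
    (hnd : (results.map Prod.fst).Nodup) (m : List (String × V))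
    (hsub : ∀ q ∈ m, q ∈ results) (k : String) (hm : m.map Prod.fst = [k]) :
    m = (((PySem.Dict.mk results).get? k).map (fun v => (k, v))).toList := by
  rcases m with _ | ⟨p1, t1⟩
  · simp at hm
  · simp only [List.map_cons, List.cons.injEq] at hm
    obtain ⟨h1, h3⟩ := hm
    obtain rfl : t1 = [] := List.map_eq_nil_iff.mp h3
    subst h1
    rw [get?_of_fst_mem results (hsub p1 (by simp)) hnd]
    simp

-- a sublist of the items whose key trace is [a, b] is the two lookups in that order
theorem eq_of_map_fst_pair {V : Type} (results : List (String × V))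
    (hnd : (results.map Prod.fst).Nodup) (m : List (String × V))
    (hsub : ∀ q ∈ m, q ∈ results) (a b : String) (hm : m.map Prod.fst = [a, b]) :
    m = (((PySem.Dict.mk results).get? a).map (fun v => (a, v))).toList
        ++ (((PySem.Dict.mk results).get? b).map (fun v => (b, v))).toList := by
  rcases m with _ | ⟨p1, t1⟩
  · simp at hm
  rcases t1 with _ | ⟨p2, t2⟩
  · have := congrArg List.length hm; simp at this
  simp only [List.map_cons, List.cons.injEq] at hm
  obtain ⟨h1, h2, h3⟩ := hm
  obtain rfl : t2 = [] := List.map_eq_nil_iff.mp h3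
  subst h1; subst h2
  rw [get?_of_fst_mem results (hsub p1 (by simp)) hnd,
      get?_of_fst_mem results (hsub p2 (by simp)) hnd]
  simp

-- the key trace of a key-filtered association list
theorem map_fst_filter {V : Type} (q : String → Bool) (l : List (String × V)) :
    (l.filter (fun p => q p.1)).map Prod.fst = (l.map Prod.fst).filter q := by
  induction l with
  | nil => rfl
  | cons p l ih => by_cases h : q p.1 <;> simp [h, ih]

-- B's comprehension over [a, b]: the filtered items are the two optional lookups concatenated.
theorem filter_pair {V : Type} (results : List (String × V)) (a b : String)
    (hnd : (results.map Prod.fst).Nodup)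
    (hord : (results.map Prod.fst).filter (fun k => ([a, b] : List String).contains k)
        = ([a, b] : List String).filter (fun k => (results.map Prod.fst).contains k)) :
    results.filter (fun p => ([a, b] : List String).contains p.1)
      = (((PySem.Dict.mk results).get? a).map (fun v => (a, v))).toList
        ++ (((PySem.Dict.mk results).get? b).map (fun v => (b, v))).toList := by
  have hmap : (results.filter (fun p => ([a, b] : List String).contains p.1)).map Prod.fst
      = ([a, b] : List String).filter (fun k => (results.map Prod.fst).contains k) := by
    rw [map_fst_filter, hord]
  have hnone : ∀ k : String, k ∉ results.map Prod.fst → (PySem.Dict.mk results).get? k = none := by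
    intro k hk
    rw [PySem.Dict.get?_eq_none_iff_not_mem_keys]
    simpa [PySem.Dict.keys] using hk
  have hsub : ∀ q ∈ results.filter (fun p => ([a, b] : List String).contains p.1), q ∈ results :=
    fun q hq => List.mem_of_mem_filter hq
  by_cases ha : a ∈ results.map Prod.fst <;> by_cases hb : b ∈ results.map Prod.fst
  · rw [show (([a, b] : List String).filter (fun k => (results.map Prod.fst).contains k)) = [a, b] by
      simp [ha, hb]] at hmap
    exact eq_of_map_fst_pair results hnd _ hsub a b hmap
  · rw [show (([a, b] : List String).filter (fun k => (results.map Prod.fst).contains k)) = [a] by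
      simp [ha, hb]] at hmap
    rw [eq_of_map_fst_single results hnd _ hsub a hmap, hnone b hb]
    simp
  · rw [show (([a, b] : List String).filter (fun k => (results.map Prod.fst).contains k)) = [b] by
      simp [ha, hb]] at hmap
    rw [eq_of_map_fst_single results hnd _ hsub b hmap, hnone a ha]
    simp
  · rw [show (([a, b] : List String).filter (fun k => (results.map Prod.fst).contains k)) = [] by
      simp [ha, hb]] at hmap
    rw [List.map_eq_nil_iff.mp hmap, hnone a ha, hnone b hb]
    simp

theorem filterMap_pair {a b : String} {α : Type} (f : String → Option α) :
    ([a, b] : List String).filterMap f = (f a).toList ++ (f b).toList := by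
  rcases ha : f a <;> rcases hb : f b <;> simp [ha, hb]

-- ===== VERDICT (by name: the statement is the Claim_ definition above) =====
theorem categorize_backends_spec : Claim_equal_categorize_backends := by
  intro results _ hpre
  obtain ⟨hnd, hordp, horde⟩ := hpre
  unfold Spec_categorize_backends categorize_backends categorize_backends_alt
  obtain ⟨h1, h2⟩ := foldA_items results PySem.Dict.empty PySem.Dict.empty
    (by intro p _; simp) (by intro p _; simp) hnd
  simp only [h1, h2, filterMap_pair, items_empty', List.nil_append]
  rw [filter_pair results _ _ hnd hordp, filter_pair results _ _ hnd horde]
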